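-- pv_equiv track=rewrite | github.com/Stals/PythonRPG | utils/listFormat.py | joinListWithFormat
-- ===== SOURCE A (Python) =====
-- def joinListWithFormat(list, split = False): #TODO! добавить чтобы он сам брал __str__()? чтобы измежать то что проиходит в battle.printturnOrder
-- 	#Code from: http://stackoverflow.com/questions/7136432/data-table-in-python
-- 	if len(list) >=1 :
-- 		if split:
-- 			list = splitListBy2Spaces(list)
-- 		newList = []
-- 		sub1 = [
-- 			[s.ljust(max(len(i) for i in grp)) for s in grp]
-- 			for grp in zip(*list)]
-- 		for p in [" ".join(row) for row in zip(*sub1)]: newList.append(p)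
-- 		return newList
-- 	else:
-- 		raise Exception("List length < 1")
--
-- def splitListBy2Spaces(lst):
-- 	if len(lst) >=1 :
-- 		newList = []
-- 		newLine = []
-- 		for line in lst:
-- 			#!line also should be a list
-- 			if not isinstance(line, list) or isinstance(line, tuple) :
-- 				line = [line]
-- 			for str in line:
-- 				newLine.extend(str.split('  '))
-- 			newList.append(newLine)
-- 			newLine = []
-- 		return newList
-- 	else:
-- 			raise Exception("List length < 1")
-- ===== SOURCE B (Python) =====
-- def joinListWithFormat(list, split=False):
--     if len(list) < 1:
--         raise Exception("List length < 1")
--     rows = list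
--     if split:
--         rows = [[p for cell in line for p in cell.split('  ')] for line in rows]
--     n = min(len(r) for r in rows)
--     if n == 0:
--         return []
--     # build the output column by column: each pass extends every line by one padded cell
--     acc = [''] * len(rows)
--     for j in range(n):
--         w = max(len(r[j]) for r in rows)
--         sep = '' if j == 0 else ' '
--         acc = [acc[i] + sep + rows[i][j].ljust(w) for i in range(len(rows))]
--     return acc
-- ===== Notes on version B (the rewrite author's own statement) =====
-- stated objective: faster
-- what changed: B never transposes or joins: it builds every output line incrementally in a single fold over the columns, computing each column's max width once per column (A recomputes the column maximum for every cell across two zip-transposes).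
import Mathlib
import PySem

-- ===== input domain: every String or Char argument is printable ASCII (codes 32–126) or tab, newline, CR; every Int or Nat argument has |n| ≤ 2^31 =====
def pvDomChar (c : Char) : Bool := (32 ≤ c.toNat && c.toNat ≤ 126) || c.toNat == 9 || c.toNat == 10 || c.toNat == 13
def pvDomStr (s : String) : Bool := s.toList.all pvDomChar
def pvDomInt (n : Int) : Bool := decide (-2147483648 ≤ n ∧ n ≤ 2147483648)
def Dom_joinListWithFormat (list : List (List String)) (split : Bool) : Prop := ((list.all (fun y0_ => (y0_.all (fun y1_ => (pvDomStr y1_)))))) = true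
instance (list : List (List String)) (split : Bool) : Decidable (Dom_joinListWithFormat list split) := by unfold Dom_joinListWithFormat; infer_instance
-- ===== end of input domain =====

-- B builds every output line incrementally in one fold over the columns (computing each
-- column's max width once per column); A double-transposes and recomputes the max per cell.
-- Proved equal on nonempty input (A raises on []).


-- shared primitive: Python's str.ljust(w) (pad on the right with spaces)
def pyLjust (s : String) (w : Int) : String :=
  String.ofList (s.toList ++ List.replicate (w - s.toList.length).toNat ' ')

-- ===== PORT A =====
-- Python zip(*ls): truncating transpose (variadic zip has no PySem primitive; exact)
def pyZipT (ls : List (List String)) : List (List String) :=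
  match ls with
  | [] => []
  | r :: rs =>
    let n := rs.foldl (fun m r' => min m r'.length) r.length
    (List.range n).map (fun j => (r :: rs).map (fun q => q.getD j ""))

def splitListBy2Spaces (lst : List (List String)) : List (List String) :=
  if 1 ≤ lst.length then
    lst.foldl (fun newList line =>
      newList ++ [line.foldl (fun newLine s => newLine ++ (PySem.Str.split? s "  ").getD []) []]) []
  else []  -- Python raises here; Pre_ excludes lst = []

def joinListWithFormat (list : List (List String)) (split : Bool) : List String :=
  if 1 ≤ list.length then
    let list := if split then splitListBy2Spaces list else list
    let sub1 := (pyZipT list).map (fun grp =>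
      grp.map (fun s =>
        pyLjust s ((PySem.List.max? (grp.map PySem.Str.len) (fun x => x)).getD 0)))
    ((pyZipT sub1).map (fun row => PySem.Str.join " " row)).foldl
      (fun newList p => newList ++ [p]) []
  else []  -- Python raises here; Pre_ excludes list = []

-- ===== PORT B =====
def joinListWithFormat_alt (list : List (List String)) (split : Bool) : List String :=
  if list.length < 1 then []  -- Python raises here; Pre_ excludes list = []
  else
    let rows := if split then
        list.map (fun line => line.flatMap (fun cell => (PySem.Str.split? cell "  ").getD []))
      else list
    let n := ((PySem.List.min? (rows.map List.length) (fun x => x)).getD 0)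
    if n = 0 then []
    else
      (List.range n).foldl (fun acc j =>
        let w := (PySem.List.max? (rows.map (fun r => PySem.Str.len (r.getD j ""))) (fun x => x)).getD 0
        let sep := if j = 0 then "" else " "
        (List.range rows.length).map (fun i =>
          acc.getD i "" ++ sep ++ pyLjust ((rows.getD i []).getD j "") w))
        (List.replicate rows.length "")

-- ===== PRECONDITION & SPEC =====
-- A raises Exception("List length < 1") on the empty list; nothing else raises.
def Pre_joinListWithFormat (list : List (List String)) (split : Bool) : Prop := list ≠ []
instance (list : List (List String)) (split : Bool) : Decidable (Pre_joinListWithFormat list split) := by unfold Pre_joinListWithFormat; infer_instance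
def pvWitness_joinListWithFormat : List (List String) × Bool := ([["ab", "c"], ["d", "efg"]], true)

def Spec_joinListWithFormat (list : List (List String)) (split : Bool) (out : List String) : Prop := out = joinListWithFormat_alt list split
instance (list : List (List String)) (split : Bool) (out : List String) : Decidable (Spec_joinListWithFormat list split out) := by unfold Spec_joinListWithFormat; infer_instance

-- ===== CLAIM (what is proved, stated in full; the proofs are below) =====
def Claim_equal_joinListWithFormat : Prop := ∀ (list : List (List String)) (split : Bool), Dom_joinListWithFormat list split → Pre_joinListWithFormat list split → Spec_joinListWithFormat list split (joinListWithFormat list split)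

-- ===== LEMMAS AND PROOFS =====
theorem foldl_min_const {m : Nat} : ∀ (cs : List (List String)) (a : Nat), (∀ c ∈ cs, c.length = m) → a = m → cs.foldl (fun acc r => min acc r.length) a = m := by
  intro cs
  induction cs with
  | nil => intro a _ ha; simpa using ha
  | cons c cs ih =>
    intro a h ha
    simp only [List.foldl_cons]
    exact ih _ (fun c' hc' => h c' (List.mem_cons_of_mem _ hc')) (by rw [ha, h c (List.mem_cons_self)]; simp)

theorem zipT_const (cols : List (List String)) (m : Nat) (hne : cols ≠ [])
    (h : ∀ c ∈ cols, c.length = m) :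
    pyZipT cols = (List.range m).map (fun i => cols.map (fun q => q.getD i "")) := by
  match cols with
  | [] => exact absurd rfl hne
  | c :: cs =>
    simp only [pyZipT]
    rw [foldl_min_const cs c.length (fun c' hc' => h c' (List.mem_cons_of_mem _ hc')) (h c List.mem_cons_self)]

theorem map_eq_range_map {β : Type} (F : List String → β) (L : List (List String)) :
    L.map F = (List.range L.length).map (fun i => F (L.getD i [])) := by
  apply List.ext_getElem
  · simp
  · intro i h1 h2
    simp [List.getD_eq_getElem?_getD, List.getElem?_eq_getElem (by simpa using h2)]

theorem getD_map_lt {α β : Type} (g : α → β) (l : List α) (i : Nat) (d : β) (da : α) (h : i < l.length) :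
    (l.map g).getD i d = g (l.getD i da) := by
  simp [List.getD_eq_getElem?_getD, h]

theorem core_eq (L : List (List String)) (hne : L ≠ []) :
    (((pyZipT ((pyZipT L).map (fun grp =>
        grp.map (fun s => pyLjust s ((PySem.List.max? (grp.map PySem.Str.len) (fun x => x)).getD 0))))).map
        (fun row => PySem.Str.join " " row)).foldl (fun nl p => nl ++ [p]) [])
    =
    (let n := ((PySem.List.min? (L.map List.length) (fun x => x)).getD 0);
     if n = 0 then [] else
       let widths := (List.range n).map (fun j =>
         (PySem.List.max? (L.map (fun r => PySem.Str.len (r.getD j ""))) (fun x => x)).getD 0);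
       L.map (fun r => PySem.Str.join " "
         ((List.range n).map (fun j => pyLjust (r.getD j "") (widths.getD j 0))))) := by
  match L with
  | [] => exact absurd rfl hne
  | r :: rs =>
  simp only []
  set n := rs.foldl (fun m r' => min m r'.length) r.length with hn
  have hnB : ((PySem.List.min? ((r :: rs).map List.length) (fun x => x)).getD 0) = n := by
    rw [List.map_cons, PySem.List.min?_id_cons]
    simp [List.foldl_map, hn]
  have hzip : pyZipT (r :: rs) = (List.range n).map (fun i => (r :: rs).map (fun q => q.getD i "")) := by
    simp [pyZipT, hn]
  rw [hnB, hzip]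
  by_cases h0 : n = 0
  · simp [h0, pyZipT]
  · simp only [if_neg h0]
    set L := r :: rs with hL
    set pad : Nat → String → String := fun j s =>
      pyLjust s ((PySem.List.max? ((L.map (fun q => q.getD j "")).map PySem.Str.len) (fun x => x)).getD 0) with hpad
    have hsub : ((List.range n).map (fun i => L.map (fun q => q.getD i ""))).map (fun grp =>
        grp.map (fun s => pyLjust s ((PySem.List.max? (grp.map PySem.Str.len) (fun x => x)).getD 0)))
        = (List.range n).map (fun j => (L.map (fun q => q.getD j "")).map (pad j)) := by
      simp [List.map_map, hpad]
    rw [hsub]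
    have hcols_ne : (List.range n).map (fun j => (L.map (fun q => q.getD j "")).map (pad j)) ≠ [] := by
      simp [List.range_eq_nil, h0]
    have hcols_len : ∀ c ∈ (List.range n).map (fun j => (L.map (fun q => q.getD j "")).map (pad j)),
        c.length = L.length := by
      intro c hc
      simp only [List.mem_map] at hc
      obtain ⟨j, _, rfl⟩ := hc
      simp
    rw [zipT_const _ L.length hcols_ne hcols_len, PySem.List.foldl_append_singleton_eq_self]
    rw [List.map_map, map_eq_range_map (fun rr => PySem.Str.join " " ((List.range n).map (fun j =>
      pyLjust (rr.getD j "") (((List.range n).map (fun j' =>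
        (PySem.List.max? (L.map (fun q => PySem.Str.len (q.getD j' ""))) (fun x => x)).getD 0)).getD j 0)))) L]
    apply List.map_congr_left
    intro i hi
    simp only [List.mem_range] at hi
    simp only [Function.comp]
    congr 1
    rw [List.map_map]
    apply List.map_congr_left
    intro j hj
    simp only [List.mem_range] at hj
    simp only [Function.comp]
    rw [getD_map_lt (g := pad j) (da := "") _ _ _ (by simpa using hi),
        getD_map_lt (g := fun q => q.getD j "") (da := ([] : List String)) _ _ _ (by simpa using hi)]
    rw [getD_map_lt (g := fun j' => (PySem.List.max? (L.map (fun q => PySem.Str.len (q.getD j' ""))) (fun x => x)).getD 0) (da := 0) _ _ _ (by simpa using hj)]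
    simp [hpad, List.map_map, Function.comp_def, PySem.Str.len_eq, List.getD_eq_getElem?_getD, hj]

theorem splitA_eq (lst : List (List String)) (h : 1 ≤ lst.length) :
    splitListBy2Spaces lst
      = lst.map (fun line => line.flatMap (fun cell => (PySem.Str.split? cell "  ").getD [])) := by
  rw [splitListBy2Spaces, if_pos h]
  simp [List.flatMap_def]
  clear h
  induction lst with
  | nil => rfl
  | cons a t ih => simp [ih]

theorem chars_join_snoc (sep : List Char) : ∀ (l : List (List Char)) (b : List Char), l ≠ [] →
    PySem.Chars.join sep (l ++ [b]) = PySem.Chars.join sep l ++ sep ++ b := by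
  intro l
  induction l with
  | nil => intro b h; exact absurd rfl h
  | cons a t ih =>
    intro b _
    cases t with
    | nil => simp [PySem.Chars.join_cons_cons, PySem.Chars.join_singleton]
    | cons c cs =>
      have h1 : (a :: c :: cs) ++ [b] = a :: c :: (cs ++ [b]) := by simp
      rw [h1, PySem.Chars.join_cons_cons]
      have h2 : c :: (cs ++ [b]) = (c :: cs) ++ [b] := by simp
      rw [h2, ih b (by simp), PySem.Chars.join_cons_cons]
      simp [List.append_assoc]

theorem str_join_snoc (l : List String) (b : String) (h : l ≠ []) :
    PySem.Str.join " " (l ++ [b]) = PySem.Str.join " " l ++ " " ++ b := by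
  simp only [PySem.Str.join, List.map_append, List.map_cons, List.map_nil]
  rw [chars_join_snoc _ _ _ (by simpa using h), String.ofList_append, String.ofList_append]
  simp [String.ofList_toList]

theorem getD_range_map {β : Type} (g : Nat → β) (k i : Nat) (d : β) (h : i < k) :
    ((List.range k).map g).getD i d = g i := by
  simp [List.getD_eq_getElem?_getD, h]

-- the column-fold of port B produces, after m ≥ 1 columns, the join of the first m padded cells per row
theorem fold_inv (L : List (List String)) :
    ∀ (m : Nat), 1 ≤ m →
    (List.range m).foldl (fun acc j =>
        let w := (PySem.List.max? (L.map (fun r => PySem.Str.len (r.getD j ""))) (fun x => x)).getD 0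
        let sep := if j = 0 then "" else " "
        (List.range L.length).map (fun i =>
          acc.getD i "" ++ sep ++ pyLjust ((L.getD i []).getD j "") w))
        (List.replicate L.length "")
    = (List.range L.length).map (fun i => PySem.Str.join " " ((List.range m).map (fun j =>
        pyLjust ((L.getD i []).getD j "")
          ((PySem.List.max? (L.map (fun r => PySem.Str.len (r.getD j ""))) (fun x => x)).getD 0)))) := by
  intro m
  induction m with
  | zero => intro h; omega
  | succ m ih =>
    intro _
    by_cases hm : 1 ≤ m
    · rw [List.range_succ, List.foldl_append, ih hm]
      simp only [List.foldl_cons, List.foldl_nil]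
      apply List.map_congr_left
      intro i hi
      simp only [List.mem_range] at hi
      rw [getD_range_map _ _ _ _ hi, if_neg (by omega), List.map_append,
          List.map_cons, List.map_nil, str_join_snoc _ _ (by simp [List.range_eq_nil]; omega)]
    · have hm0 : m = 0 := by omega
      subst hm0
      simp only [List.range_succ, List.range_zero, List.nil_append, List.foldl_cons, List.foldl_nil,
        List.map_cons, List.map_nil]
      apply List.map_congr_left
      intro i hi
      simp only [List.mem_range] at hi
      rw [List.getD_replicate _ (by simpa using hi)]
      simp [PySem.Str.join]

-- ===== VERDICT (by name: the statement is the Claim_ definition above) =====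
theorem joinListWithFormat_spec : Claim_equal_joinListWithFormat := by
  intro list split hdom hpre
  have hpre' : list ≠ [] := hpre
  have hlen : 1 ≤ list.length := List.length_pos_of_ne_nil hpre'
  have hlt : ¬ list.length < 1 := by omega
  unfold Spec_joinListWithFormat joinListWithFormat joinListWithFormat_alt
  rw [if_pos hlen, if_neg hlt]
  have main : ∀ (L : List (List String)), L ≠ [] →
      (((pyZipT ((pyZipT L).map (fun grp =>
          grp.map (fun s => pyLjust s ((PySem.List.max? (grp.map PySem.Str.len) (fun x => x)).getD 0))))).map
          (fun row => PySem.Str.join " " row)).foldl (fun nl p => nl ++ [p]) [])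
      =
      (let n := ((PySem.List.min? (L.map List.length) (fun x => x)).getD 0);
       if n = 0 then [] else
         (List.range n).foldl (fun acc j =>
           let w := (PySem.List.max? (L.map (fun r => PySem.Str.len (r.getD j ""))) (fun x => x)).getD 0
           let sep := if j = 0 then "" else " "
           (List.range L.length).map (fun i =>
             acc.getD i "" ++ sep ++ pyLjust ((L.getD i []).getD j "") w))
           (List.replicate L.length "")) := by
    intro L hL
    rw [core_eq L hL]
    simp only []
    set n := ((PySem.List.min? (L.map List.length) (fun x => x)).getD 0) with hn
    by_cases h0 : n = 0
    · simp [h0]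
    · rw [if_neg h0, if_neg h0, fold_inv L n (by omega)]
      rw [map_eq_range_map (fun r => PySem.Str.join " "
        ((List.range n).map (fun j => pyLjust (r.getD j "")
          (((List.range n).map (fun j' =>
            (PySem.List.max? (L.map (fun r' => PySem.Str.len (r'.getD j' ""))) (fun x => x)).getD 0)).getD j 0)))) L]
      apply List.map_congr_left
      intro i hi
      simp only [List.mem_range] at hi
      congr 1
      apply List.map_congr_left
      intro j hj
      simp only [List.mem_range] at hj
      rw [getD_range_map _ _ _ _ hj]
  cases split with
  | false => simpa using main list hpre'
  | true =>
    simp only [splitA_eq list hlen]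
    have hne : list.map (fun line => line.flatMap (fun cell => (PySem.Str.split? cell "  ").getD [])) ≠ [] := by
      simp [hpre']
    simpa using main _ hne
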